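-- pv_equiv track=rewrite | github.com/45812576-source/stock | research/deep_researcher.py | _resolve_steps
-- ===== SOURCE A (Python) =====
-- _STEP_DEPS = {
--     "business_model": [],
--     "value_chain": ["business_model"],
--     "financial": ["business_model"],
--     "valuation": ["business_model", "value_chain", "financial"],
--     "sector_heat": [],
--     "research_data": ["business_model"],
-- }
--
-- ALL_STEPS = ["business_model", "value_chain", "financial", "valuation", "sector_heat", "research_data"]
--
-- def _resolve_steps(steps):
--     """展开步骤列表，自动补充依赖步骤"""
--     if steps is None:
--         return list(ALL_STEPS)
--     needed = set(steps)
--     changed = True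
--     while changed:
--         changed = False
--         for s in list(needed):
--             for dep in _STEP_DEPS.get(s, []):
--                 if dep not in needed:
--                     needed.add(dep)
--                     changed = True
--     # 按 ALL_STEPS 顺序返回
--     return [s for s in ALL_STEPS if s in needed]
-- ===== SOURCE B (Python) =====
-- ALL_STEPS = ["business_model", "value_chain", "financial", "valuation", "sector_heat", "research_data"]
--
-- # Per-step dependency closures precomputed from _STEP_DEPS (each deps list is already transitively closed).
-- _STEP_CLOSURE = {
--     "business_model": ("business_model",),
--     "value_chain": ("value_chain", "business_model"),
--     "financial": ("financial", "business_model"),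
--     "valuation": ("valuation", "business_model", "value_chain", "financial"),
--     "sector_heat": ("sector_heat",),
--     "research_data": ("research_data", "business_model"),
-- }
--
-- def _resolve_steps(steps):
--     """展开步骤列表，自动补充依赖步骤"""
--     if steps is None:
--         return list(ALL_STEPS)
--     needed = set()
--     for t in steps:
--         needed.update(_STEP_CLOSURE.get(t, (t,)))
--     return [s for s in ALL_STEPS if s in needed]
-- ===== Notes on version B (the rewrite author's own statement) =====
-- stated objective: simpler
-- what changed: Replaces the while-changed fixed-point rescan of the whole needed set with a single pass over steps that unions precomputed per-step dependency closures from a literal table.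
import Mathlib
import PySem

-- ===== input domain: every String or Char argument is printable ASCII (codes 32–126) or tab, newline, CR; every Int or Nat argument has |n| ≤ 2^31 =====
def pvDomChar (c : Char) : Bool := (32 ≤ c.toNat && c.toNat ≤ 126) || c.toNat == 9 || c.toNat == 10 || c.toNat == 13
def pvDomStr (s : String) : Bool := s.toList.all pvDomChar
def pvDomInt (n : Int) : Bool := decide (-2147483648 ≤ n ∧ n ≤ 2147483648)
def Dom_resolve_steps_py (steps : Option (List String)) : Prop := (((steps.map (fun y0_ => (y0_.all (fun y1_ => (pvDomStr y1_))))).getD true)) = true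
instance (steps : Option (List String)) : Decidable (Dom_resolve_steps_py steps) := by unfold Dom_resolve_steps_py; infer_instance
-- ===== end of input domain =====

-- B replaces A's repeated while-changed rescans of the whole set by a single pass over `steps`
-- union-ing precomputed per-step dependency closures (objective: simpler; return value only, no mutation involved).

-- ===== PORT A =====
def pvAllSteps : List String :=
  ["business_model", "value_chain", "financial", "valuation", "sector_heat", "research_data"]

def pvStepDeps : PySem.Dict String (List String) :=
  PySem.Dict.ofList
    [("business_model", []), ("value_chain", ["business_model"]),
     ("financial", ["business_model"]),
     ("valuation", ["business_model", "value_chain", "financial"]),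
     ("sector_heat", []), ("research_data", ["business_model"])]

-- _STEP_DEPS.get(s, [])
def pvDeps (s : String) : List String := pvStepDeps.getD s []

-- 'for dep in _STEP_DEPS.get(s, []): if dep not in needed: needed.add(dep); changed = True'
def pvAddDep (st : PySem.Set String × Bool) (dep : String) : PySem.Set String × Bool :=
  if PySem.Set.contains st.1 dep then st else (PySem.Set.add st.1 dep, true)

def pvInner (st : PySem.Set String × Bool) (s : String) : PySem.Set String × Bool :=
  (pvDeps s).foldl pvAddDep st

-- one iteration of the loop body: 'changed = False; for s in list(needed): …'
def pvPass (needed : PySem.Set String) : PySem.Set String × Bool :=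
  needed.foldl pvInner (needed, false)

-- 'while changed:' — fuel only makes the loop structurally total; it is never exhausted
-- (proved below: a second pass never changes the set)
def pvLoop : Nat → PySem.Set String → PySem.Set String
  | 0, needed => needed
  | fuel + 1, needed =>
      let st := pvPass needed
      if st.2 then pvLoop fuel st.1 else needed

def resolve_steps_py (steps : Option (List String)) : List String :=
  match steps with
  | none => pvAllSteps
  | some l =>
      let needed := pvLoop 4 (PySem.Set.ofList l)
      pvAllSteps.filter (fun s => PySem.Set.contains needed s)

-- ===== PORT B =====
def pvStepClosure : PySem.Dict String (List String) :=
  PySem.Dict.ofList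
    [("business_model", ["business_model"]),
     ("value_chain", ["value_chain", "business_model"]),
     ("financial", ["financial", "business_model"]),
     ("valuation", ["valuation", "business_model", "value_chain", "financial"]),
     ("sector_heat", ["sector_heat"]),
     ("research_data", ["research_data", "business_model"])]

-- _STEP_CLOSURE.get(t, (t,))
def pvClosOf (t : String) : List String := pvStepClosure.getD t [t]

def resolve_steps_py_alt (steps : Option (List String)) : List String :=
  match steps with
  | none => pvAllSteps
  | some l =>
      let needed :=
        l.foldl (fun acc t => PySem.Set.update acc (pvClosOf t)) PySem.Set.empty
      pvAllSteps.filter (fun s => PySem.Set.contains needed s)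

-- ===== PRECONDITION & SPEC =====
def Spec_resolve_steps_py (steps : Option (List String)) (out : List String) : Prop := out = resolve_steps_py_alt steps
instance (steps : Option (List String)) (out : List String) : Decidable (Spec_resolve_steps_py steps out) := by unfold Spec_resolve_steps_py; infer_instance

-- ===== CLAIM (what is proved, stated in full; the proofs are below) =====
def Claim_equal_resolve_steps_py : Prop := ∀ (steps : Option (List String)), Dom_resolve_steps_py steps → Spec_resolve_steps_py steps (resolve_steps_py steps)

-- ===== LEMMAS AND PROOFS =====

theorem pvStepDeps_mk : pvStepDeps = PySem.Dict.mk
    [("business_model", []), ("value_chain", ["business_model"]),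
     ("financial", ["business_model"]),
     ("valuation", ["business_model", "value_chain", "financial"]),
     ("sector_heat", []), ("research_data", ["business_model"])] := by decide

theorem pvStepClosure_mk : pvStepClosure = PySem.Dict.mk
    [("business_model", ["business_model"]),
     ("value_chain", ["value_chain", "business_model"]),
     ("financial", ["financial", "business_model"]),
     ("valuation", ["valuation", "business_model", "value_chain", "financial"]),
     ("sector_heat", ["sector_heat"]),
     ("research_data", ["research_data", "business_model"])] := by decide

theorem pvDeps_eq (t : String) : pvDeps t =
    (if t = "business_model" then [] else if t = "value_chain" then ["business_model"]
     else if t = "financial" then ["business_model"]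
     else if t = "valuation" then ["business_model", "value_chain", "financial"]
     else if t = "sector_heat" then [] else if t = "research_data" then ["business_model"]
     else []) := by
  simp only [pvDeps, pvStepDeps_mk, PySem.Dict.getD_eq_get?_getD, PySem.Dict.get?_mk_cons,
    beq_iff_eq]
  split_ifs with h1 h2 h3 h4 h5 h6 <;>
    first
      | rfl
      | (subst_vars; simp_all)

-- each closure-table entry is its key followed by that key's (already transitive) deps list
theorem pvClosOf_cases (t : String) : pvClosOf t =
    (if t = "business_model" then ["business_model"]
     else if t = "value_chain" then ["value_chain", "business_model"]
     else if t = "financial" then ["financial", "business_model"]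
     else if t = "valuation" then ["valuation", "business_model", "value_chain", "financial"]
     else if t = "sector_heat" then ["sector_heat"]
     else if t = "research_data" then ["research_data", "business_model"]
     else [t]) := by
  simp only [pvClosOf, pvStepClosure_mk, PySem.Dict.getD_eq_get?_getD, PySem.Dict.get?_mk_cons,
    beq_iff_eq]
  split_ifs with h1 h2 h3 h4 h5 h6 <;>
    first
      | rfl
      | (subst_vars; simp_all)

theorem pvClosOf_eq (t : String) : pvClosOf t = t :: pvDeps t := by
  rw [pvClosOf_cases, pvDeps_eq]
  split_ifs with h1 h2 h3 h4 h5 h6 <;> simp_all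

-- the literal deps lists are transitively closed
theorem pvDeps_trans (t s x : String) (hs : s ∈ pvDeps t) (hx : x ∈ pvDeps s) :
    x ∈ pvDeps t := by
  have hbm : pvDeps "business_model" = [] := by decide
  have hvc : pvDeps "value_chain" = ["business_model"] := by decide
  have hfin : pvDeps "financial" = ["business_model"] := by decide
  rw [pvDeps_eq] at hs ⊢
  split_ifs at hs ⊢
  all_goals simp only [List.mem_cons, List.not_mem_nil, or_false] at hs ⊢
  · subst hs; rw [hbm] at hx; simp at hx
  · subst hs; rw [hbm] at hx; simp at hx
  · rcases hs with rfl | rfl | rfl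
    · rw [hbm] at hx; simp at hx
    · rw [hvc] at hx; simp only [List.mem_cons, List.not_mem_nil, or_false] at hx; tauto
    · rw [hfin] at hx; simp only [List.mem_cons, List.not_mem_nil, or_false] at hx; tauto
  · subst hs; rw [hbm] at hx; simp at hx

theorem pvAddDep_of_mem {st : PySem.Set String × Bool} {d : String} (hd : d ∈ st.1) :
    pvAddDep st d = st := by
  unfold pvAddDep
  rw [(PySem.Set.contains_iff st.1 d).mpr hd]
  simp

theorem pvAddDep_of_not_mem {st : PySem.Set String × Bool} {d : String} (hd : d ∉ st.1) :
    pvAddDep st d = (PySem.Set.add st.1 d, true) := by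
  unfold pvAddDep
  rw [show PySem.Set.contains st.1 d = false from by
    rw [Bool.eq_false_iff]
    intro hc
    exact hd ((PySem.Set.contains_iff st.1 d).mp hc)]
  simp

theorem pvInnerFold_mem (ds : List String) (st : PySem.Set String × Bool) (x : String) :
    x ∈ (ds.foldl pvAddDep st).1 ↔ x ∈ st.1 ∨ x ∈ ds := by
  induction ds generalizing st with
  | nil => simp
  | cons d ds ih =>
      rw [List.foldl_cons, ih]
      simp only [List.mem_cons]
      by_cases hd : d ∈ st.1
      · rw [pvAddDep_of_mem hd]
        constructor
        · tauto
        · rintro (h | rfl | h)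
          · exact Or.inl h
          · exact Or.inl hd
          · exact Or.inr h
      · rw [pvAddDep_of_not_mem hd]
        simp only [PySem.Set.mem_add]
        tauto

theorem pvInnerFold_changed (ds : List String) (st : PySem.Set String × Bool) :
    (ds.foldl pvAddDep st).2 = true ↔ st.2 = true ∨ ∃ d ∈ ds, d ∉ st.1 := by
  induction ds generalizing st with
  | nil => simp
  | cons d ds ih =>
      rw [List.foldl_cons, ih]
      by_cases hd : d ∈ st.1
      · rw [pvAddDep_of_mem hd]
        constructor
        · rintro (h | ⟨e, he, hen⟩)
          · exact Or.inl h
          · exact Or.inr ⟨e, List.mem_cons_of_mem _ he, hen⟩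
        · rintro (h | ⟨e, he, hen⟩)
          · exact Or.inl h
          · rcases List.mem_cons.mp he with rfl | he'
            · exact absurd hd hen
            · exact Or.inr ⟨e, he', hen⟩
      · rw [pvAddDep_of_not_mem hd]
        constructor
        · intro _
          exact Or.inr ⟨d, List.mem_cons_self, hd⟩
        · intro _
          exact Or.inl rfl

theorem pvPassFold_mem (l : List String) (st : PySem.Set String × Bool) (x : String) :
    x ∈ (l.foldl pvInner st).1 ↔ x ∈ st.1 ∨ ∃ s ∈ l, x ∈ pvDeps s := by
  induction l generalizing st with
  | nil => simp
  | cons s l ih =>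
      rw [List.foldl_cons, ih]
      have hmem : x ∈ (pvInner st s).1 ↔ x ∈ st.1 ∨ x ∈ pvDeps s :=
        pvInnerFold_mem (pvDeps s) st x
      rw [hmem]
      constructor
      · rintro ((h | h) | ⟨t, ht, hd⟩)
        · exact Or.inl h
        · exact Or.inr ⟨s, List.mem_cons_self, h⟩
        · exact Or.inr ⟨t, List.mem_cons_of_mem _ ht, hd⟩
      · rintro (h | ⟨t, ht, hd⟩)
        · exact Or.inl (Or.inl h)
        · rcases List.mem_cons.mp ht with rfl | ht'
          · exact Or.inl (Or.inr hd)
          · exact Or.inr ⟨t, ht', hd⟩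

theorem pvPassFold_changed (l : List String) (st : PySem.Set String × Bool) :
    (l.foldl pvInner st).2 = true ↔ st.2 = true ∨ ∃ s ∈ l, ∃ d ∈ pvDeps s, d ∉ st.1 := by
  induction l generalizing st with
  | nil => simp
  | cons s l ih =>
      rw [List.foldl_cons, ih]
      have hch : (pvInner st s).2 = true ↔ st.2 = true ∨ ∃ d ∈ pvDeps s, d ∉ st.1 :=
        pvInnerFold_changed (pvDeps s) st
      have hmem : ∀ y, y ∈ (pvInner st s).1 ↔ y ∈ st.1 ∨ y ∈ pvDeps s := fun y =>
        pvInnerFold_mem (pvDeps s) st y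
      rw [hch]
      constructor
      · rintro ((h | ⟨d, hd, hdn⟩) | ⟨t, ht, d, hd, hdn⟩)
        · exact Or.inl h
        · exact Or.inr ⟨s, List.mem_cons_self, d, hd, hdn⟩
        · refine Or.inr ⟨t, List.mem_cons_of_mem _ ht, d, hd, fun hmem' => ?_⟩
          exact hdn ((hmem d).mpr (Or.inl hmem'))
      · rintro (h | ⟨t, ht, d, hd, hdn⟩)
        · exact Or.inl (Or.inl h)
        · rcases List.mem_cons.mp ht with rfl | ht'
          · exact Or.inl (Or.inr ⟨d, hd, hdn⟩)
          · by_cases hin : d ∈ (pvInner st s).1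
            · rcases (hmem d).mp hin with h1 | h1
              · exact absurd h1 hdn
              · exact Or.inl (Or.inr ⟨d, h1, hdn⟩)
            · exact Or.inr ⟨t, ht', d, hd, hin⟩

theorem pvPass_mem (N : PySem.Set String) (x : String) :
    x ∈ (pvPass N).1 ↔ x ∈ N ∨ ∃ s ∈ N, x ∈ pvDeps s := by
  simpa using pvPassFold_mem N (N, false) x

theorem pvPass_changed (N : PySem.Set String) :
    (pvPass N).2 = true ↔ ∃ s ∈ N, ∃ d ∈ pvDeps s, d ∉ N := by
  simpa using pvPassFold_changed N (N, false)

-- a second pass can never change the set: pvPass N is dependency-closed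
theorem pvPass_closed (N : PySem.Set String) : (pvPass (pvPass N).1).2 = false := by
  rw [Bool.eq_false_iff]
  intro hch
  rcases (pvPass_changed _).mp hch with ⟨s, hs, d, hd, hdn⟩
  rcases (pvPass_mem N s).mp hs with hsN | ⟨t, ht, hst⟩
  · exact hdn ((pvPass_mem N d).mpr (Or.inr ⟨s, hsN, hd⟩))
  · exact hdn ((pvPass_mem N d).mpr (Or.inr ⟨t, ht, pvDeps_trans t s d hst hd⟩))

theorem pvLoop_mem (N : PySem.Set String) (x : String) :
    x ∈ pvLoop 4 N ↔ x ∈ N ∨ ∃ s ∈ N, x ∈ pvDeps s := by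
  show x ∈ (if (pvPass N).2 then pvLoop 3 (pvPass N).1 else N) ↔ _
  by_cases hc : (pvPass N).2 = true
  · rw [if_pos hc]
    show x ∈ (if (pvPass (pvPass N).1).2 then _ else (pvPass N).1) ↔ _
    rw [pvPass_closed N, if_neg (by simp), pvPass_mem]
  · rw [if_neg hc]
    constructor
    · exact Or.inl
    · rintro (h | ⟨s, hs, hd⟩)
      · exact h
      · by_contra hxn
        exact hc ((pvPass_changed N).mpr ⟨s, hs, x, hd, hxn⟩)

theorem pvBFold_mem (l : List String) (acc : PySem.Set String) (x : String) :
    x ∈ l.foldl (fun acc t => PySem.Set.update acc (pvClosOf t)) acc ↔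
      x ∈ acc ∨ ∃ t ∈ l, x ∈ pvClosOf t := by
  induction l generalizing acc with
  | nil => simp
  | cons t l ih =>
      rw [List.foldl_cons, ih, PySem.Set.mem_update]
      constructor
      · rintro ((h | h) | ⟨u, hu, hc⟩)
        · exact Or.inl h
        · exact Or.inr ⟨t, List.mem_cons_self, h⟩
        · exact Or.inr ⟨u, List.mem_cons_of_mem _ hu, hc⟩
      · rintro (h | ⟨u, hu, hc⟩)
        · exact Or.inl (Or.inl h)
        · rcases List.mem_cons.mp hu with rfl | hu'
          · exact Or.inl (Or.inr hc)
          · exact Or.inr ⟨u, hu', hc⟩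

-- ===== VERDICT (by name: the statement is the Claim_ definition above) =====
theorem resolve_steps_py_spec : Claim_equal_resolve_steps_py := by
  intro steps _
  unfold Spec_resolve_steps_py
  cases steps with
  | none => rfl
  | some l =>
      show pvAllSteps.filter _ = pvAllSteps.filter _
      apply List.filter_congr
      intro s _
      rw [Bool.eq_iff_iff, PySem.Set.contains_iff, PySem.Set.contains_iff,
        pvLoop_mem, pvBFold_mem]
      simp only [PySem.Set.mem_ofList, pvClosOf_eq, List.mem_cons, PySem.Set.empty]
      constructor
      · rintro (h | ⟨t, ht, hd⟩)
        · exact Or.inr ⟨s, h, Or.inl rfl⟩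
        · exact Or.inr ⟨t, ht, Or.inr hd⟩
      · rintro (h | ⟨t, ht, rfl | hd⟩)
        · simp at h
        · exact Or.inl ht
        · exact Or.inr ⟨t, ht, hd⟩
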